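-- pv_equiv track=rewrite | github.com/zhuralol/vk_profile_analisis | zhuraapp/routes.py | dictcleaner
-- ===== SOURCE A (Python) =====
-- def dictcleaner(keyname, lst):
--     s = set()
--     out = list()
--     for item in lst:
--         if item[keyname] not in s:
--             s.add(item[keyname])
--             out.append(item)
--     return out
-- ===== SOURCE B (Python) =====
-- def dictcleaner(keyname, lst):
--     # Pass 1 (backwards): overwrite so the SMALLEST index per key survives.
--     first = {}
--     for i in range(len(lst) - 1, -1, -1):
--         first[lst[i][keyname]] = i
--     # Pass 2: keep exactly the items sitting at their key's first index.
--     return [item for i, item in enumerate(lst) if first[item[keyname]] == i]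
-- ===== Notes on version B (the rewrite author's own statement) =====
-- stated objective: alternative
-- what changed: Instead of a seen-set with a conditional append, B makes a reversed index pass that overwrites a key->index dict (so each key's first index survives) and then builds the output by filtering enumerate(lst) for items whose index equals their key's first index; there is no membership test and no incremental output list.
import Mathlib
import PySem

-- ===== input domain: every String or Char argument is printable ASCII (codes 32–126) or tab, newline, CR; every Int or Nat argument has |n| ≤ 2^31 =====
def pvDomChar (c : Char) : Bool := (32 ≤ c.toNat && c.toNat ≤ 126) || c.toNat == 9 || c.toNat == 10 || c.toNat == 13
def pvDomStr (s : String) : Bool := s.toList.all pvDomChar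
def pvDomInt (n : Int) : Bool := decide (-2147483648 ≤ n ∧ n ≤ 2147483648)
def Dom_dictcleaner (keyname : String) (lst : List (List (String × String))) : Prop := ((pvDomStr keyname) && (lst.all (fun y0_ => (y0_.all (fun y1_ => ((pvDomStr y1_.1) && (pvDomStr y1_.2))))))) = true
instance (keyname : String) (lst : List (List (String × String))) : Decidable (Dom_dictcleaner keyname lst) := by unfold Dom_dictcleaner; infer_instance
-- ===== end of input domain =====

-- B replaces the seen-set-plus-append loop by a reversed index pass overwriting a key→index
-- dict (each key's first index survives) and a filter of enumerate(lst) keeping the items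
-- sitting at their key's first index (same linear cost; a genuinely different algorithm).

-- item[keyname]: first-match lookup in the association list; total form getD "" is used,
-- Pre_dictcleaner restricts to inputs where the key is present (Python raises KeyError otherwise).
def pvItemKey (keyname : String) (item : List (String × String)) : String :=
  (PySem.Dict.mk item).getD keyname ""

-- ===== PORT A =====
def dictcleaner (keyname : String) (lst : List (List (String × String))) : List (List (String × String)) :=
  (lst.foldl
    (fun (st : PySem.Set String × List (List (String × String))) item =>
      let k := pvItemKey keyname item
      if PySem.Set.contains st.1 k then st
      else (PySem.Set.add st.1 k, st.2 ++ [item]))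
    (PySem.Set.empty, [])).2

-- ===== PORT B =====
-- pass 1 of Source B: for i in range(len(lst)-1, -1, -1): first[lst[i][keyname]] = i
def pvFirst (keyname : String) (lst : List (List (String × String))) : PySem.Dict String Int :=
  (PySem.List.pyRange (PySem.List.len lst - 1) (-1) (-1)).foldl
    (fun d i => d.insert (pvItemKey keyname (PySem.List.pyGetD lst i [])) i)
    PySem.Dict.empty

-- pass 2 of Source B: [item for i, item in enumerate(lst) if first[item[keyname]] == i]
def dictcleaner_alt (keyname : String) (lst : List (List (String × String))) : List (List (String × String)) :=
  ((PySem.List.enumerate lst).filter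
      (fun p => (pvFirst keyname lst).getD (pvItemKey keyname p.2) 0 == p.1)).map (fun p => p.2)

-- ===== PRECONDITION & SPEC =====
-- Pre_: every item has the key (Python A raises KeyError on an item missing keyname).
def Pre_dictcleaner (keyname : String) (lst : List (List (String × String))) : Prop :=
  ∀ item ∈ lst, item.any (fun p => p.1 == keyname) = true
instance (keyname : String) (lst : List (List (String × String))) : Decidable (Pre_dictcleaner keyname lst) := by unfold Pre_dictcleaner; infer_instance
def pvWitness_dictcleaner : String × (List (List (String × String))) :=
  ("id", [[("id", "1"), ("x", "a")], [("id", "1"), ("x", "b")], [("id", "2")]])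

def Spec_dictcleaner (keyname : String) (lst : List (List (String × String))) (out : List (List (String × String))) : Prop := out = dictcleaner_alt keyname lst
instance (keyname : String) (lst : List (List (String × String))) (out : List (List (String × String))) : Decidable (Spec_dictcleaner keyname lst out) := by unfold Spec_dictcleaner; infer_instance

-- ===== CLAIM (what is proved, stated in full; the proofs are below) =====
def Claim_equal_dictcleaner : Prop := ∀ (keyname : String) (lst : List (List (String × String))), Dom_dictcleaner keyname lst → Pre_dictcleaner keyname lst → Spec_dictcleaner keyname lst (dictcleaner keyname lst)

-- ===== LEMMAS AND PROOFS =====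

-- The reversed overwrite loop, read back to front, is a foldr over the forward range.
theorem pvFirst_eq_foldr (keyname : String) (lst : List (List (String × String))) :
    pvFirst keyname lst
    = (PySem.List.pyRange 0 (lst.length : Int) 1).foldr
        (fun i d => d.insert (pvItemKey keyname (PySem.List.pyGetD lst i [])) i)
        PySem.Dict.empty := by
  unfold pvFirst
  have h : PySem.List.pyRange (PySem.List.len lst - 1) (-1) (-1)
      = (PySem.List.pyRange 0 (lst.length : Int) 1).reverse := by
    rw [PySem.List.pyRange_neg_one_eq_reverse]
    norm_num [PySem.List.len_eq]
  rw [h, List.foldl_reverse]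

-- get? of the foldr: the first occurrence index of k in the suffix starting at a.
theorem pvFirst_get?_aux (keyname : String) (lst : List (List (String × String)))
    (m : Nat) : ∀ (a : Nat), a + m = lst.length → ∀ k : String,
    (((PySem.List.pyRange (a : Int) (lst.length : Int) 1).foldr
        (fun i d => d.insert (pvItemKey keyname (PySem.List.pyGetD lst i [])) i)
        PySem.Dict.empty).get? k)
    = (PySem.List.index? ((lst.map (pvItemKey keyname)).drop a) k).map (fun j => ((a + j : Nat) : Int)) := by
  induction m with
  | zero =>
    intro a ha k
    have hnil : PySem.List.pyRange (a : Int) (lst.length : Int) 1 = [] :=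
      PySem.List.pyRange_one_eq_nil (by omega)
    have hdrop : (lst.map (pvItemKey keyname)).drop a = [] := by
      simp [List.drop_eq_nil_iff]; omega
    simp [hnil, hdrop, PySem.Dict.get?_empty, PySem.List.index?]
  | succ m ih =>
    intro a ha k
    have hlt : a < lst.length := by omega
    have hcons : PySem.List.pyRange (a : Int) (lst.length : Int) 1
        = (a : Int) :: PySem.List.pyRange ((a : Int) + 1) (lst.length : Int) 1 :=
      PySem.List.pyRange_one_cons (by exact_mod_cast hlt)
    have hget : PySem.List.pyGetD lst (a : Int) [] = lst[a] :=
      PySem.List.pyGetD_ofNat _ _ _ hlt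
    have hdrop : (lst.map (pvItemKey keyname)).drop a
        = pvItemKey keyname lst[a] :: (lst.map (pvItemKey keyname)).drop (a + 1) := by
      rw [List.drop_eq_getElem_cons (by simpa using hlt)]
      simp
    have hcast : ((a : Int) + 1) = ((a + 1 : Nat) : Int) := by push_cast; ring
    rw [hcons, List.foldr_cons, hget, PySem.Dict.get?_insert, hdrop]
    by_cases hk : k = pvItemKey keyname lst[a]
    · subst hk
      rw [if_pos rfl, PySem.List.index?_cons_self]
      simp
    · have hne : pvItemKey keyname lst[a] ≠ k := fun h => hk (Eq.symm h)
      rw [if_neg hk, hcast, ih (a + 1) (by omega) k, PySem.List.index?_cons_of_ne _ hne]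
      cases PySem.List.index? ((lst.map (pvItemKey keyname)).drop (a + 1)) k with
      | none => simp
      | some j => simp; ring

theorem pvFirst_get? (keyname : String) (lst : List (List (String × String))) (k : String) :
    (pvFirst keyname lst).get? k
    = (PySem.List.index? (lst.map (pvItemKey keyname)) k).map (fun j => ((j : Nat) : Int)) := by
  rw [pvFirst_eq_foldr]
  have := pvFirst_get?_aux keyname lst lst.length 0 (by omega) k
  simpa using this

-- If k already occurs before position m, its first index is < m.
theorem pvFirst_getD_of_mem_take (keyname : String) (lst : List (List (String × String)))
    (m : Nat) (k : String) (hmem : k ∈ (lst.map (pvItemKey keyname)).take m) :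
    ∃ j : Nat, j < m ∧ (pvFirst keyname lst).getD k 0 = (j : Int) := by
  have hsplit : lst.map (pvItemKey keyname)
      = (lst.map (pvItemKey keyname)).take m ++ (lst.map (pvItemKey keyname)).drop m :=
    (List.take_append_drop m _).symm
  have hidx : PySem.List.index? (lst.map (pvItemKey keyname)) k
      = PySem.List.index? ((lst.map (pvItemKey keyname)).take m) k := by
    conv_lhs => rw [hsplit]
    exact PySem.List.index?_append_of_mem _ hmem
  have hsome : ∃ j, PySem.List.index? ((lst.map (pvItemKey keyname)).take m) k = some j := by
    have := (PySem.List.index?_isSome_iff ((lst.map (pvItemKey keyname)).take m) k).mpr hmem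
    exact Option.isSome_iff_exists.mp this
  obtain ⟨j, hj⟩ := hsome
  obtain ⟨pre, suf, hpre, hlen, -⟩ := (PySem.List.index?_eq_some_iff _ _ _).mp hj
  have hjlt : j < m := by
    have : pre.length < ((lst.map (pvItemKey keyname)).take m).length := by
      rw [hpre]; simp
    have hle : ((lst.map (pvItemKey keyname)).take m).length ≤ m := by simp
    omega
  refine ⟨j, hjlt, ?_⟩
  rw [PySem.Dict.getD_eq_get?_getD, pvFirst_get?, hidx, hj]
  rfl

-- If k first occurs exactly at position m, its first index is m.
theorem pvFirst_getD_self (keyname : String) (lst : List (List (String × String)))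
    (m : Nat) (hm : m < lst.length)
    (hnot : pvItemKey keyname lst[m] ∉ (lst.map (pvItemKey keyname)).take m) :
    (pvFirst keyname lst).getD (pvItemKey keyname lst[m]) 0 = (m : Int) := by
  have hml : m < (lst.map (pvItemKey keyname)).length := by simpa using hm
  have htake : (lst.map (pvItemKey keyname)).take (m + 1)
      = (lst.map (pvItemKey keyname)).take m ++ [pvItemKey keyname lst[m]] := by
    rw [List.take_add_one]
    congr 1
    rw [List.getElem?_eq_getElem hml]
    simp
  have hsplit : lst.map (pvItemKey keyname)
      = (lst.map (pvItemKey keyname)).take (m + 1) ++ (lst.map (pvItemKey keyname)).drop (m + 1) :=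
    (List.take_append_drop (m + 1) _).symm
  have hmem : pvItemKey keyname lst[m] ∈ (lst.map (pvItemKey keyname)).take (m + 1) := by
    rw [htake]; simp
  have hidx : PySem.List.index? (lst.map (pvItemKey keyname)) (pvItemKey keyname lst[m])
      = some m := by
    conv_lhs => rw [hsplit]
    rw [PySem.List.index?_append_of_mem _ hmem, htake,
      PySem.List.index?_append_singleton_self _ _ hnot]
    congr 1
    simp; omega
  rw [PySem.Dict.getD_eq_get?_getD, pvFirst_get?, hidx]
  rfl

-- Main invariant: A's loop over the suffix starting at m produces B's filtered enumeration.
theorem pv_main (keyname : String) (lst : List (List (String × String))) :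
    ∀ (rest : List (List (String × String))) (m : Nat)
      (s : PySem.Set String) (out : List (List (String × String))),
    rest = lst.drop m →
    (∀ x, PySem.Set.contains s x = true ↔ x ∈ (lst.map (pvItemKey keyname)).take m) →
    (rest.foldl
      (fun (st : PySem.Set String × List (List (String × String))) item =>
        let k := pvItemKey keyname item
        if PySem.Set.contains st.1 k then st
        else (PySem.Set.add st.1 k, st.2 ++ [item]))
      (s, out)).2
    = out ++ ((PySem.List.enumerate rest (m : Int)).filter
        (fun p => (pvFirst keyname lst).getD (pvItemKey keyname p.2) 0 == p.1)).map (fun p => p.2) := by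
  intro rest
  induction rest with
  | nil => intro m s out _ _; simp [PySem.List.enumerate_nil]
  | cons item r ih =>
    intro m s out hrest hs
    have hm : m < lst.length := by
      by_contra h
      rw [List.drop_eq_nil_iff.mpr (by omega)] at hrest
      exact List.cons_ne_nil _ _ hrest
    have hdrop := List.drop_eq_getElem_cons hm (l := lst)
    rw [hdrop] at hrest
    obtain ⟨hitem, hr⟩ : item = lst[m] ∧ r = lst.drop (m + 1) := by
      injection hrest with h1 h2; exact ⟨h1, h2⟩
    have htake : (lst.map (pvItemKey keyname)).take (m + 1)
        = (lst.map (pvItemKey keyname)).take m ++ [pvItemKey keyname lst[m]] := by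
      rw [List.take_add_one]
      congr 1
      rw [List.getElem?_eq_getElem (by simpa using hm)]
      simp
    rw [List.foldl_cons, PySem.List.enumerate_cons]
    by_cases hc : PySem.Set.contains s (pvItemKey keyname item) = true
    · -- seen before: A skips; B's filter rejects (the key's first index is < m)
      have hmem : pvItemKey keyname item ∈ (lst.map (pvItemKey keyname)).take m :=
        (hs _).mp hc
      obtain ⟨j, hj, hgd⟩ := pvFirst_getD_of_mem_take keyname lst m _ hmem
      have hcond : ((pvFirst keyname lst).getD (pvItemKey keyname item) 0 == (m : Int)) = false := by
        rw [hgd]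
        simp only [beq_eq_false_iff_ne, ne_eq, Int.natCast_inj]
        omega
      have hs' : ∀ x, PySem.Set.contains s x = true ↔
          x ∈ (lst.map (pvItemKey keyname)).take (m + 1) := by
        intro x
        rw [hs x, htake]
        constructor
        · intro h; exact List.mem_append_left _ h
        · intro h
          rcases List.mem_append.mp h with h | h
          · exact h
          · rw [List.mem_singleton.mp h, ← hitem]; exact hmem
      rw [if_pos hc, ih (m + 1) s out hr hs']
      simp [hcond]
    · -- first occurrence: A appends; B's filter keeps (the key's first index is m)
      have hnot : pvItemKey keyname item ∉ (lst.map (pvItemKey keyname)).take m :=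
        fun h => hc ((hs _).mpr h)
      have hcond : ((pvFirst keyname lst).getD (pvItemKey keyname item) 0 == (m : Int)) = true := by
        rw [hitem, pvFirst_getD_self keyname lst m hm (hitem ▸ hnot)]
        simp
      have hs' : ∀ x, PySem.Set.contains (PySem.Set.add s (pvItemKey keyname item)) x = true ↔
          x ∈ (lst.map (pvItemKey keyname)).take (m + 1) := by
        intro x
        rw [PySem.Set.contains_iff, PySem.Set.mem_add, htake]
        constructor
        · intro h
          rcases h with h | h
          · exact List.mem_append_left _ ((hs x).mp ((PySem.Set.contains_iff s x).mpr h))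
          · subst h; rw [← hitem]; simp
        · intro h
          rcases List.mem_append.mp h with h | h
          · exact Or.inl ((PySem.Set.contains_iff s x).mp ((hs x).mpr h))
          · exact Or.inr (by rw [List.mem_singleton.mp h, hitem])
      rw [if_neg hc, ih (m + 1) (PySem.Set.add s (pvItemKey keyname item)) (out ++ [item]) hr hs']
      simp [hcond]

-- ===== VERDICT (by name: the statement is the Claim_ definition above) =====
theorem dictcleaner_spec : Claim_equal_dictcleaner := by
  intro keyname lst _ _
  unfold Spec_dictcleaner dictcleaner dictcleaner_alt
  have := pv_main keyname lst lst 0 PySem.Set.empty [] (by simp) (by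
    intro x; simp [PySem.Set.empty])
  simpa using this
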